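-- pv_equiv track=rewrite | github.com/danideveloping/fds-exercises | fds-exercise-1/template/task1/main.py | build_causal_edges
-- ===== SOURCE A (Python) =====
-- from typing import Dict, List, Tuple, Set
--
-- Clock = List[int]
--
-- CommitToClock = Dict[str, Clock]
--
-- def causally_precedes(a: Clock, b: Clock) -> bool:
--     if len(a) != len(b):
--         return False
--     le_all = True
--     lt_any = False
--     for i in range(len(a)):
--         if a[i] > b[i]:
--             le_all = False
--             break
--         if a[i] < b[i]:
--             lt_any = True
--     return le_all and lt_any
--
-- def build_causal_edges(commits: List[str], clocks: CommitToClock) -> Set[Tuple[str, str]]: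
--     edges: Set[Tuple[str, str]] = set()
--     for i in range(len(commits)):
--         u = commits[i]
--         for j in range(len(commits)):
--             if i == j:
--                 continue
--             v = commits[j]
--             if causally_precedes(clocks[u], clocks[v]):
--                 edges.add((u, v))
--     return edges
-- ===== SOURCE B (Python) =====
-- def build_causal_edges(commits, clocks):
--     # memoize the happens-before relation over DISTINCT clock vectors (join-based test),
--     # then a single table-lookup pass over the commit pairs
--     distinct = list(dict.fromkeys(tuple(clocks[c]) for c in commits))
--     prec = {(a, b): len(a) == len(b) and a != b and tuple(map(max, a, b)) == b
--             for a in distinct for b in distinct}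
--     return {(u, v)
--             for u in commits
--             for v in commits
--             if prec[tuple(clocks[u]), tuple(clocks[v])]}
-- ===== Notes on version B (the rewrite author's own statement) =====
-- stated objective: alternative
-- what changed: B first deduplicates the clock vectors (dict.fromkeys), precomputes the happens-before relation once per DISTINCT clock pair into a lookup table using a lattice-join test (componentwise max equals b) instead of A's flag-and-break index loop, and then emits edges in one table-lookup pass over the commit pairs, so the componentwise scan disappears from the pair loop.
-- outside the precondition, e.g. on build_causal_edges(['x'], {}): A returns set(), B raises KeyError
import Mathlib
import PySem

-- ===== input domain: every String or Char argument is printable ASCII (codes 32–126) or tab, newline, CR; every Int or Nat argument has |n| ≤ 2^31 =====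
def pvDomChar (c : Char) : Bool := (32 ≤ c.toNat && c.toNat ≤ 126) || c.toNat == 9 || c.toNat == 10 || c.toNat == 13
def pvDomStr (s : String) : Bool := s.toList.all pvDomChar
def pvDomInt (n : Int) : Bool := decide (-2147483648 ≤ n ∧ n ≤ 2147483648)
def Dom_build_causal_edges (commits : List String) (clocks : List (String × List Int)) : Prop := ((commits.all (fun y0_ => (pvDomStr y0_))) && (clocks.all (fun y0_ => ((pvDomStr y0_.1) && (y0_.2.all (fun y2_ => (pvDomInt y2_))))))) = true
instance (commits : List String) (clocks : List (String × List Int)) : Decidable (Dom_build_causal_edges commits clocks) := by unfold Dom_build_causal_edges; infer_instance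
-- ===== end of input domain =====

-- B memoizes the happens-before relation over the DISTINCT clock vectors (a lattice-join test) into a table,
-- then emits the edges by one table-lookup pass over the commit pairs; same return value on Pre_.

-- ===== PORT A =====
-- dict lookup clocks[c]: first match; Python raises KeyError when the key is absent (excluded by Pre_), the port returns []
def pvClockOf (clocks : List (String × List Int)) (c : String) : List Int :=
  (clocks.lookup c).getD []

-- A's 'for i in range(len(a))' flag loop with break, ported as simultaneous structural recursion
-- (exact: the loop body indexes a[i], b[i] and is only reached when the lengths are equal)
def cpLoop : List Int → List Int → Bool → Bool → Bool
  | x :: xs, y :: ys, le_all, lt_any =>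
      if x > y then false && lt_any    -- break with le_all = False; then return le_all and lt_any
      else cpLoop xs ys le_all (lt_any || decide (x < y))
  | _, _, le_all, lt_any => le_all && lt_any

def causally_precedes (a b : List Int) : Bool :=
  if a.length ≠ b.length then false
  else cpLoop a b true false

def build_causal_edges (commits : List String) (clocks : List (String × List Int)) : List (String × String) :=
  (PySem.List.pyRange 0 (commits.length : Int) 1).foldl (fun edges i =>
    let u := PySem.List.pyGetD commits i ""
    (PySem.List.pyRange 0 (commits.length : Int) 1).foldl (fun edges j =>
      if i == j then edges
      else
        let v := PySem.List.pyGetD commits j ""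
        if causally_precedes (pvClockOf clocks u) (pvClockOf clocks v) then
          PySem.Set.add edges (u, v)
        else edges) edges) PySem.Set.empty

-- ===== PORT B =====
-- B's predicate: len(a)==len(b) and a != b and tuple(map(max,a,b)) == b (map truncates = zipWith)
def pvJoinPrec (a b : List Int) : Bool :=
  a.length == b.length && !(a == b) && (List.zipWith max a b == b)

def build_causal_edges_alt (commits : List String) (clocks : List (String × List Int)) : List (String × String) :=
  let distinct : List (List Int) := PySem.Set.ofList (commits.map (pvClockOf clocks))
  -- prec dict; Python prec[k] raises KeyError on a missing key, but every looked-up key is present: getD is exact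
  let prec : PySem.Dict (List Int × List Int) Bool :=
    distinct.foldl (fun d a => distinct.foldl (fun d b => d.insert (a, b) (pvJoinPrec a b)) d) PySem.Dict.empty
  commits.foldl (fun edges u =>
    commits.foldl (fun edges v =>
      if prec.getD (pvClockOf clocks u, pvClockOf clocks v) false then
        PySem.Set.add edges (u, v)
      else edges) edges) PySem.Set.empty

-- ===== PRECONDITION & SPEC =====
-- Pre_ requires every commit to be a key of clocks: on a missing key both Pythons raise KeyError, except that
-- A returns set() when len(commits) ≤ 1 (its loop body never looks a clock up) while B's dedup pass still raises there.
def Pre_build_causal_edges (commits : List String) (clocks : List (String × List Int)) : Prop :=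
  ∀ c ∈ commits, c ∈ clocks.map Prod.fst
instance (commits : List String) (clocks : List (String × List Int)) : Decidable (Pre_build_causal_edges commits clocks) := by unfold Pre_build_causal_edges; infer_instance

def pvWitness_build_causal_edges : List String × (List (String × List Int)) :=
  (["a", "b"], [("a", [0, 1]), ("b", [1, 1])])

def Spec_build_causal_edges (commits : List String) (clocks : List (String × List Int)) (out : List (String × String)) : Prop := out = build_causal_edges_alt commits clocks
instance (commits : List String) (clocks : List (String × List Int)) (out : List (String × String)) : Decidable (Spec_build_causal_edges commits clocks out) := by unfold Spec_build_causal_edges; infer_instance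

-- ===== CLAIM (what is proved, stated in full; the proofs are below) =====
def Claim_equal_build_causal_edges : Prop := ∀ (commits : List String) (clocks : List (String × List Int)), Dom_build_causal_edges commits clocks → Pre_build_causal_edges commits clocks → Spec_build_causal_edges commits clocks (build_causal_edges commits clocks)

-- ===== LEMMAS AND PROOFS =====

-- the common shape both ports reduce to: the unpruned elementwise double fold
def pvCanon (commits : List String) (clocks : List (String × List Int)) : List (String × String) :=
  commits.foldl (fun s u =>
    commits.foldl (fun s v =>
      if causally_precedes (pvClockOf clocks u) (pvClockOf clocks v) then PySem.Set.add s (u, v)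
      else s) s) PySem.Set.empty

lemma cpLoop_eq (a : List Int) : ∀ (b : List Int), a.length = b.length → ∀ (lt : Bool),
    cpLoop a b true lt = ((a.zip b).all (fun p => decide (p.1 ≤ p.2)) && (lt || !(a == b))) := by
  induction a with
  | nil =>
    intro b hb lt
    cases b with
    | nil => simp [cpLoop]
    | cons y ys => simp at hb
  | cons x xs ih =>
    intro b hb lt
    cases b with
    | nil => simp at hb
    | cons y ys =>
      simp only [List.length_cons, Nat.add_right_cancel_iff] at hb
      by_cases h : x > y
      · have hle : ¬ (x ≤ y) := by omega
        simp [cpLoop, h, hle]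
      · rw [show cpLoop (x :: xs) (y :: ys) true lt = cpLoop xs ys true (lt || decide (x < y)) by
          simp [cpLoop, h]]
        rw [ih ys hb (lt || decide (x < y))]
        have hxy : x ≤ y := by omega
        by_cases he : x = y
        · simp [he]
        · have hlt : x < y := by omega
          simp [hxy, hlt, he]

lemma zipWith_max_eq (a : List Int) : ∀ (b : List Int), a.length = b.length →
    ((List.zipWith max a b == b) = (a.zip b).all (fun p => decide (p.1 ≤ p.2))) := by
  induction a with
  | nil => intro b hb; cases b <;> simp_all
  | cons x xs ih =>
    intro b hb
    cases b with
    | nil => simp at hb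
    | cons y ys =>
      simp only [List.length_cons, Nat.add_right_cancel_iff] at hb
      simp only [List.zipWith_cons_cons, List.zip_cons_cons, List.all_cons, List.cons_beq_cons]
      rw [ih ys hb]
      by_cases h : x ≤ y
      · simp [h]
      · simp [show max x y = x from by omega, show x ≠ y from by omega, h]

lemma cp_eq_join (a b : List Int) : causally_precedes a b = pvJoinPrec a b := by
  unfold causally_precedes pvJoinPrec
  by_cases hl : a.length = b.length
  · rw [if_neg (by simp [hl]), cpLoop_eq a b hl false, zipWith_max_eq a b hl]
    simp [hl, Bool.and_comm]
  · rw [if_pos (by simp [hl])]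
    simp [hl]

lemma cp_self (c : List Int) : causally_precedes c c = false := by
  rw [cp_eq_join]
  simp [pvJoinPrec]

-- getD of the inner insert fold (b runs over L, key fixed first component a)
lemma getD_inner (f : List Int → List Int → Bool) (x y : List Int) (a : List Int) (L : List (List Int)) :
    ∀ (d : PySem.Dict (List Int × List Int) Bool),
    (L.foldl (fun d b => d.insert (a, b) (f a b)) d).getD (x, y) false
      = if a = x ∧ y ∈ L then f x y else d.getD (x, y) false := by
  induction L with
  | nil => intro d; simp
  | cons b bs ih =>
    intro d
    rw [List.foldl_cons, ih, PySem.Dict.getD_insert]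
    by_cases h1 : a = x ∧ y ∈ bs
    · simp [h1]
    · by_cases h2 : a = x
      · by_cases h3 : y = b
        · subst h2; subst h3; simp_all
        · have : ¬ ((x, y) = (a, b)) := by simp [h2, h3]
          simp_all
      · have : ¬ ((x, y) = (a, b)) := by intro h; apply h2; exact (Prod.mk.injEq .. ▸ h).1.symm
        simp_all
lemma getD_nested (f : List Int → List Int → Bool) (x y : List Int) (L : List (List Int)) :
    ∀ (l : List (List Int)) (d : PySem.Dict (List Int × List Int) Bool),
    (l.foldl (fun d a => L.foldl (fun d b => d.insert (a, b) (f a b)) d) d).getD (x, y) false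
      = if x ∈ l ∧ y ∈ L then f x y else d.getD (x, y) false := by
  intro l
  induction l with
  | nil => intro d; simp
  | cons a as ih =>
    intro d
    rw [List.foldl_cons, ih, getD_inner]
    by_cases h1 : x ∈ as ∧ y ∈ L
    · simp [h1]
    · by_cases hyL : y ∈ L
      · by_cases hxas : x ∈ as
        · simp [hxas, hyL]
        · by_cases h2 : a = x
          · subst h2; simp [hyL, hxas]
          · have hxa : ¬ (x = a) := fun h => h2 h.symm
            simp [hxas, hyL, h2, hxa]
      · simp [hyL]

lemma A_eq_canon (commits : List String) (clocks : List (String × List Int)) :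
    build_causal_edges commits clocks = pvCanon commits clocks := by
  unfold build_causal_edges pvCanon
  have hstep : (fun (edges : List (String × String)) (i : Int) =>
      (PySem.List.pyRange 0 (commits.length : Int) 1).foldl (fun edges j =>
        if i == j then edges
        else
          if causally_precedes (pvClockOf clocks (PySem.List.pyGetD commits i ""))
              (pvClockOf clocks (PySem.List.pyGetD commits j "")) then
            PySem.Set.add edges (PySem.List.pyGetD commits i "", PySem.List.pyGetD commits j "")
          else edges) edges)
      = (fun (edges : List (String × String)) (i : Int) =>
        (fun (s : List (String × String)) (u : String) =>
          commits.foldl (fun s v =>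
            if causally_precedes (pvClockOf clocks u) (pvClockOf clocks v) then PySem.Set.add s (u, v)
            else s) s) edges (PySem.List.pyGetD commits i "")) := by
    funext edges i
    have hinner : (fun (edges : List (String × String)) (j : Int) =>
        if i == j then edges
        else
          if causally_precedes (pvClockOf clocks (PySem.List.pyGetD commits i ""))
              (pvClockOf clocks (PySem.List.pyGetD commits j "")) then
            PySem.Set.add edges (PySem.List.pyGetD commits i "", PySem.List.pyGetD commits j "")
          else edges)
        = (fun (edges : List (String × String)) (j : Int) =>
          (fun (s : List (String × String)) (v : String) =>
            if causally_precedes (pvClockOf clocks (PySem.List.pyGetD commits i "")) (pvClockOf clocks v) then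
              PySem.Set.add s (PySem.List.pyGetD commits i "", v)
            else s) edges (PySem.List.pyGetD commits j "")) := by
      funext edges j
      by_cases h : i = j
      · subst h
        simp [cp_self]
      · simp [h]
    rw [hinner]
    exact PySem.List.foldl_pyRange_zero_pyGetD' commits ""
      (fun (s : List (String × String)) (v : String) =>
        if causally_precedes (pvClockOf clocks (PySem.List.pyGetD commits i "")) (pvClockOf clocks v) then
          PySem.Set.add s (PySem.List.pyGetD commits i "", v)
        else s) edges
  rw [hstep]
  exact PySem.List.foldl_pyRange_zero_pyGetD' commits ""
    (fun (s : List (String × String)) (u : String) =>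
      commits.foldl (fun s v =>
        if causally_precedes (pvClockOf clocks u) (pvClockOf clocks v) then PySem.Set.add s (u, v)
        else s) s) PySem.Set.empty

lemma B_eq_canon (commits : List String) (clocks : List (String × List Int)) :
    build_causal_edges_alt commits clocks = pvCanon commits clocks := by
  unfold build_causal_edges_alt pvCanon
  apply PySem.List.foldl_congr_mem
  intro s u hu
  apply PySem.List.foldl_congr_mem
  intro s v hv
  have hu' : pvClockOf clocks u ∈ PySem.Set.ofList (commits.map (pvClockOf clocks)) := by
    rw [PySem.Set.mem_ofList]; exact List.mem_map_of_mem hu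
  have hv' : pvClockOf clocks v ∈ PySem.Set.ofList (commits.map (pvClockOf clocks)) := by
    rw [PySem.Set.mem_ofList]; exact List.mem_map_of_mem hv
  have hkey := getD_nested pvJoinPrec (pvClockOf clocks u) (pvClockOf clocks v)
      (PySem.Set.ofList (commits.map (pvClockOf clocks)))
      (PySem.Set.ofList (commits.map (pvClockOf clocks))) PySem.Dict.empty
  rw [if_pos ⟨hu', hv'⟩] at hkey
  rw [hkey, cp_eq_join]

-- ===== VERDICT (by name: the statement is the Claim_ definition above) =====
theorem build_causal_edges_spec : Claim_equal_build_causal_edges := by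
  intro commits clocks _ _
  unfold Spec_build_causal_edges
  rw [A_eq_canon, B_eq_canon]
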